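-- pv_equiv track=rewrite | github.com/jrosa02/IO-2026S | src/gepa_agent.py | _find_plateau_step
-- ===== SOURCE A (Python) =====
-- def _find_plateau_step(cost_history: list[int]) -> int:
--     """Return the step index at which cost stopped improving."""
--     best = cost_history[0]
--     last_improvement = 0
--     for i, c in enumerate(cost_history):
--         if c < best:
--             best = c
--             last_improvement = i
--     return last_improvement
-- ===== SOURCE B (Python) =====
-- def _find_plateau_step(cost_history: list[int]) -> int:
--     """Return the step index at which cost stopped improving."""
--     def best_in(lo: int, hi: int) -> tuple[int, int]:
--         # (min value, first index of it) on cost_history[lo:hi], by divide and conquer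
--         if hi - lo <= 1:
--             return (cost_history[lo], lo)
--         mid = (lo + hi) // 2
--         ml, il = best_in(lo, mid)
--         mr, ir = best_in(mid, hi)
--         return (ml, il) if ml <= mr else (mr, ir)
--     return best_in(0, len(cost_history))[1]
-- ===== Notes on version B (the rewrite author's own statement) =====
-- stated objective: alternative
-- what changed: Replaces A's single forward pass tracking (best, last_improvement) with a divide-and-conquer recursion that finds the (min, first index) of each half and combines them preferring the left on ties; the last strict improvement is exactly the first occurrence of the global minimum.
import Mathlib
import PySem

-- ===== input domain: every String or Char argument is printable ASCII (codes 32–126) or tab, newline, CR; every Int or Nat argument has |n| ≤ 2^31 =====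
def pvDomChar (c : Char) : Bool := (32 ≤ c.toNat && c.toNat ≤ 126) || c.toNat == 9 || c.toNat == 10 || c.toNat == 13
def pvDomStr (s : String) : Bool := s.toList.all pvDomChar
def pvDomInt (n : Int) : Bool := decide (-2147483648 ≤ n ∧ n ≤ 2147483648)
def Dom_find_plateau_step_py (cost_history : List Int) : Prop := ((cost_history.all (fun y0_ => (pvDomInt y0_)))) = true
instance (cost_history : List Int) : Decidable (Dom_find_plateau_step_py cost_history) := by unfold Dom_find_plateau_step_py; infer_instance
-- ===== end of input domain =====

-- B replaces A's forward (best, last_improvement) tracking loop with a divide-and-conquer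
-- recursion returning (min, first index) of each half, left-preferred on ties; objective: alternative.


-- ===== PORT A =====
def find_plateau_step_py (cost_history : List Int) : Int :=
  -- best = cost_history[0]  (IndexError on []; excluded by Pre_)
  let best : Int := (PySem.List.pyGet? cost_history 0).getD 0
  -- for i, c in enumerate(cost_history): if c < best: best = c; last_improvement = i
  let st := (PySem.List.enumerate cost_history 0).foldl
    (fun (s : Int × Int) (p : Int × Int) => if p.2 < s.1 then (p.2, p.1) else s)
    (best, 0)
  st.2

-- ===== PORT B =====
-- best_in(lo, hi): (min value, first index of it) on cost_history[lo:hi], divide and conquer.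
-- lo, hi are Nat (Python only calls it with 0 ≤ lo < hi); (lo+hi)//2 = Nat division, exact here.
def pvBestIn (xs : List Int) (lo hi : Nat) : Int × Nat :=
  if hi - lo ≤ 1 then ((PySem.List.pyGet? xs (lo : Int)).getD 0, lo)
  else
    let mid := (lo + hi) / 2
    let L := pvBestIn xs lo mid
    let R := pvBestIn xs mid hi
    if L.1 ≤ R.1 then L else R
termination_by hi - lo
decreasing_by
  all_goals
    rename_i h
    have h2 : lo + 2 ≤ hi := by omega
    have hmid1 : lo + 1 ≤ (lo + hi) / 2 := by
      rw [Nat.le_div_iff_mul_le (by norm_num)]; omega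
    have hmid2 : (lo + hi) / 2 < hi := by
      rw [Nat.div_lt_iff_lt_mul (by norm_num)]; omega
    omega

def find_plateau_step_py_alt (cost_history : List Int) : Int :=
  ((pvBestIn cost_history 0 cost_history.length).2 : Int)

-- ===== PRECONDITION & SPEC =====
-- Pre_ excludes exactly the empty list, on which both Pythons raise IndexError.
def Pre_find_plateau_step_py (cost_history : List Int) : Prop := cost_history ≠ []
instance (cost_history : List Int) : Decidable (Pre_find_plateau_step_py cost_history) := by unfold Pre_find_plateau_step_py; infer_instance
def pvWitness_find_plateau_step_py : List Int := [3, 1, 2, 1]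

def Spec_find_plateau_step_py (cost_history : List Int) (out : Int) : Prop := out = find_plateau_step_py_alt cost_history
instance (cost_history : List Int) (out : Int) : Decidable (Spec_find_plateau_step_py cost_history out) := by unfold Spec_find_plateau_step_py; infer_instance

-- ===== CLAIM (what is proved, stated in full; the proofs are below) =====
def Claim_equal_find_plateau_step_py : Prop := ∀ (cost_history : List Int), Dom_find_plateau_step_py cost_history → Pre_find_plateau_step_py cost_history → Spec_find_plateau_step_py cost_history (find_plateau_step_py cost_history)

-- ===== LEMMAS AND PROOFS =====

-- minimum of a nonempty list, and the first index of that minimum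
def lmin : List Int → Int
  | [] => 0
  | x :: t => t.foldl min x

def lidx (l : List Int) : Nat := (PySem.List.index? l (lmin l)).getD 0

theorem lmin_mem (l : List Int) (h : l ≠ []) : lmin l ∈ l := by
  cases l with
  | nil => exact absurd rfl h
  | cons x t =>
    rcases PySem.List.foldl_min_mem t x with h1 | h1
    · simp [lmin, h1]
    · simp [lmin, h1]

theorem lmin_le (l : List Int) (x : Int) (hx : x ∈ l) : lmin l ≤ x := by
  cases l with
  | nil => cases hx
  | cons y t =>
    rcases List.mem_cons.mp hx with h1 | h1
    · subst h1; exact (PySem.List.foldl_min_le t x).1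
    · exact (PySem.List.foldl_min_le t y).2 x h1

theorem foldl_min_comm (t : List Int) (c d : Int) :
    t.foldl min (min c d) = min c (t.foldl min d) := by
  induction t generalizing d with
  | nil => simp
  | cons y ys ih =>
    simp only [List.foldl_cons]
    rw [min_assoc, ih]

theorem lmin_append (a b : List Int) (ha : a ≠ []) (hb : b ≠ []) :
    lmin (a ++ b) = min (lmin a) (lmin b) := by
  cases a with
  | nil => exact absurd rfl ha
  | cons x ta =>
    cases b with
    | nil => exact absurd rfl hb
    | cons y tb =>
      simp only [lmin, List.cons_append, List.foldl_cons, List.foldl_append]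
      rw [← foldl_min_comm tb (ta.foldl min x) y]

theorem index?_append_right (a b : List Int) (v : Int) (h : v ∉ a) :
    PySem.List.index? (a ++ b) v = (PySem.List.index? b v).map (a.length + ·) := by
  induction a with
  | nil =>
    rw [List.nil_append]
    cases h' : PySem.List.index? b v with
    | none => rfl
    | some j => simp
  | cons x ta ih =>
    have hx : x ≠ v := by intro he; exact h (by simp [he])
    rw [List.cons_append, PySem.List.index?_cons_of_ne _ hx,
      ih (by intro hm; exact h (by simp [hm]))]
    cases PySem.List.index? b v with
    | none => simp
    | some j => simp; omega

theorem lidx_append (a b : List Int) (ha : a ≠ []) (hb : b ≠ []) :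
    lidx (a ++ b) = if lmin a ≤ lmin b then lidx a else a.length + lidx b := by
  by_cases hle : lmin a ≤ lmin b
  · rw [if_pos hle]
    unfold lidx
    rw [lmin_append a b ha hb, min_eq_left hle,
      PySem.List.index?_append_of_mem b (lmin_mem a ha)]
  · rw [if_neg hle]
    have hlt : lmin b < lmin a := lt_of_not_ge hle
    have hnot : lmin b ∉ a := by
      intro hm
      exact absurd (lmin_le a _ hm) (by omega)
    unfold lidx
    rw [lmin_append a b ha hb, min_eq_right hlt.le, index?_append_right a b _ hnot]
    have hmem := lmin_mem b hb
    rcases Option.isSome_iff_exists.mp ((PySem.List.index?_isSome_iff b _).mpr hmem) with ⟨j, hj⟩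
    rw [hj]
    simp

theorem bestIn_spec (xs : List Int) (n lo hi : Nat) (hn : hi - lo = n)
    (h1 : lo < hi) (h2 : hi ≤ xs.length) :
    pvBestIn xs lo hi =
      (lmin ((xs.drop lo).take (hi - lo)), lo + lidx ((xs.drop lo).take (hi - lo))) := by
  induction n using Nat.strong_induction_on generalizing lo hi with
  | _ n ih =>
  by_cases hb : hi - lo ≤ 1
  · -- base: hi = lo + 1, the segment is the singleton [xs[lo]]
    have hhi : hi = lo + 1 := by omega
    have hlt : lo < xs.length := by omega
    have hseg : (xs.drop lo).take (hi - lo) = [xs[lo]] := by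
      rw [hhi]
      simp only [Nat.add_sub_cancel_left]
      exact List.take_one_drop_eq_of_lt_length hlt
    rw [pvBestIn, if_pos hb, hseg]
    have : PySem.List.pyGet? xs (lo : Int) = some xs[lo] := by
      rw [PySem.List.pyGet?_natCast]
      simp [hlt]
    rw [this]
    simp [lmin, lidx]
  · -- step: split at mid
    have h3 : lo + 2 ≤ hi := by omega
    obtain ⟨mid, hmid⟩ : ∃ m, m = (lo + hi) / 2 := ⟨_, rfl⟩
    have hmid1 : lo + 1 ≤ mid := by
      rw [hmid, Nat.le_div_iff_mul_le (by norm_num)]; omega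
    have hmid2 : mid < hi := by
      rw [hmid, Nat.div_lt_iff_lt_mul (by norm_num)]; omega
    have hL := ih (mid - lo) (by omega) lo mid rfl (by omega) (by omega)
    have hR := ih (hi - mid) (by omega) mid hi rfl (by omega) h2
    have hsplit : (xs.drop lo).take (hi - lo) =
        (xs.drop lo).take (mid - lo) ++ (xs.drop mid).take (hi - mid) := by
      have : hi - lo = (mid - lo) + (hi - mid) := by omega
      rw [this, List.take_add]
      congr 1
      rw [List.drop_drop]
      have h4 : lo + (mid - lo) = mid := by omega
      rw [h4]
    have hLne : (xs.drop lo).take (mid - lo) ≠ [] := by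
      apply List.ne_nil_of_length_pos
      simp only [List.length_take, List.length_drop]
      omega
    have hRne : (xs.drop mid).take (hi - mid) ≠ [] := by
      apply List.ne_nil_of_length_pos
      simp only [List.length_take, List.length_drop]
      omega
    have hLlen : ((xs.drop lo).take (mid - lo)).length = mid - lo := by
      simp only [List.length_take, List.length_drop]
      omega
    rw [pvBestIn, if_neg hb]
    simp only [← hmid]
    rw [hL, hR, hsplit,
      lmin_append _ _ hLne hRne, lidx_append _ _ hLne hRne, hLlen]
    by_cases hc : lmin ((xs.drop lo).take (mid - lo)) ≤ lmin ((xs.drop mid).take (hi - mid))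
    · rw [if_pos hc, if_pos hc, min_eq_left hc]
    · rw [if_neg hc, if_neg hc, min_eq_right (le_of_not_ge hc)]
      simp only [Prod.mk.injEq, true_and]
      omega

-- A's loop over the tail, started at index k with state (b, l), computes the running
-- minimum and (if it improved) k plus the first index in the tail of that minimum.
theorem plateau_fold_eq (t : List Int) (b l k : Int) :
    (PySem.List.enumerate t k).foldl
      (fun (s : Int × Int) (p : Int × Int) => if p.2 < s.1 then (p.2, p.1) else s)
      (b, l)
    = (t.foldl min b,
       if t.foldl min b < b
       then k + (((PySem.List.index? t (t.foldl min b)).getD 0 : Nat) : Int)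
       else l) := by
  induction t generalizing b l k with
  | nil => simp
  | cons y ys ih =>
    rw [PySem.List.enumerate_cons]
    simp only [List.foldl_cons]
    by_cases h : y < b
    · simp only [if_pos h]
      rw [ih y k (k + 1)]
      have hle := (PySem.List.foldl_min_le ys y).1
      have hlt : ys.foldl min y < b := lt_of_le_of_lt hle h
      rw [min_eq_right h.le, if_pos hlt]
      by_cases h2 : ys.foldl min y < y
      · rw [if_pos h2]
        have hmem : ys.foldl min y ∈ ys := by
          rcases PySem.List.foldl_min_mem ys y with h3 | h3
          · exact absurd h3 (by intro he; rw [he] at h2; exact lt_irrefl _ h2)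
          · exact h3
        have hne : y ≠ ys.foldl min y := by intro he; rw [← he] at h2; exact lt_irrefl _ h2
        rw [PySem.List.index?_cons_of_ne ys hne]
        rcases Option.isSome_iff_exists.mp ((PySem.List.index?_isSome_iff ys _).mpr hmem) with ⟨j, hj⟩
        rw [hj]
        simp only [Option.map_some, Option.getD_some]
        push_cast
        ring_nf
      · rw [if_neg h2]
        have he : ys.foldl min y = y := le_antisymm hle (not_lt.mp h2)
        rw [he, PySem.List.index?_cons_self]
        simp
    · simp only [if_neg h]
      rw [ih b l (k + 1)]
      rw [min_eq_left (not_lt.mp h)]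
      by_cases h2 : ys.foldl min b < b
      · rw [if_pos h2, if_pos h2]
        have hmem : ys.foldl min b ∈ ys := by
          rcases PySem.List.foldl_min_mem ys b with h3 | h3
          · exact absurd h3 (by intro he; rw [he] at h2; exact lt_irrefl _ h2)
          · exact h3
        have hne : y ≠ ys.foldl min b := by
          intro he
          exact absurd (lt_of_lt_of_le h2 (not_lt.mp h)) (by rw [← he]; exact lt_irrefl y)
        rw [PySem.List.index?_cons_of_ne ys hne]
        rcases Option.isSome_iff_exists.mp ((PySem.List.index?_isSome_iff ys _).mpr hmem) with ⟨j, hj⟩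
        rw [hj]
        simp only [Option.map_some, Option.getD_some]
        push_cast
        ring_nf
      · rw [if_neg h2, if_neg h2]

-- ===== VERDICT (by name: the statement is the Claim_ definition above) =====
theorem find_plateau_step_py_spec : Claim_equal_find_plateau_step_py := by
  intro cost_history _hdom hpre
  unfold Spec_find_plateau_step_py
  -- B = first index of the minimum of the whole list
  have hB : find_plateau_step_py_alt cost_history = ((lidx cost_history : Nat) : Int) := by
    unfold find_plateau_step_py_alt
    have hlen : 0 < cost_history.length := List.length_pos_of_ne_nil hpre
    rw [bestIn_spec cost_history cost_history.length 0 cost_history.length rfl hlen le_rfl]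
    simp
  rw [hB]
  cases cost_history with
  | nil => exact absurd rfl hpre
  | cons x t =>
    have hget : PySem.List.pyGet? (x :: t) (0 : Int) = some x := by
      simp [PySem.List.pyGet?, PySem.List.pyIdx?]
    simp only [find_plateau_step_py, hget, Option.getD_some,
      PySem.List.enumerate_cons, List.foldl_cons, lt_irrefl, if_false]
    simp only [zero_add]
    rw [plateau_fold_eq t x 0 1]
    have hle := (PySem.List.foldl_min_le t x).1
    by_cases h : t.foldl min x < x
    · rw [if_pos h]
      have hmem : t.foldl min x ∈ t := by
        rcases PySem.List.foldl_min_mem t x with h3 | h3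
        · exact absurd h3 (by intro he; rw [he] at h; exact lt_irrefl _ h)
        · exact h3
      have hne : x ≠ t.foldl min x := by intro he; rw [← he] at h; exact lt_irrefl _ h
      simp only [lidx, lmin]
      rw [PySem.List.index?_cons_of_ne t hne]
      rcases Option.isSome_iff_exists.mp ((PySem.List.index?_isSome_iff t _).mpr hmem) with ⟨j, hj⟩
      rw [hj]
      simp only [Option.map_some, Option.getD_some]
      push_cast
      ring_nf
    · rw [if_neg h]
      have he : t.foldl min x = x := le_antisymm hle (not_lt.mp h)
      simp only [lidx, lmin]
      rw [he, PySem.List.index?_cons_self]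
      simp
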